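-- pv_equiv track=rewrite | github.com/Vcaudill/Sim | ThreeAlleles.py | count
-- ===== SOURCE A (Python) =====
-- def count(newgeneration):
--     countA = 0
--     countB = 0
--     countC = 0
--     countD = 0
--     countE = 0
--     countF = 0
--     for i in newgeneration:
--         if newgeneration[i] == [0, 0]:
--             countA = countA + 1
--         if newgeneration[i] == [0, 1] or newgeneration[i] == [1, 0]:
--             countB = countB + 1
--         if newgeneration[i] == [1, 1]:
--             countC = countC + 1
--         if newgeneration[i] == [2, 0]or newgeneration[i] == [0, 2]:
--             countD = countD + 1
--         if newgeneration[i] == [2, 1] or newgeneration[i] == [1, 2]: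
--             countE = countE + 1
--         if newgeneration[i] == [2, 2]:
--             countF = countF + 1
--     return countA, countB, countC, countD, countE, countF
-- ===== SOURCE B (Python) =====
-- def count(newgeneration):
--     cnt = {}
--     for v in newgeneration.values():
--         cnt[tuple(v)] = cnt.get(tuple(v), 0) + 1
--     return (cnt.get((0, 0), 0),
--             cnt.get((0, 1), 0) + cnt.get((1, 0), 0),
--             cnt.get((1, 1), 0),
--             cnt.get((2, 0), 0) + cnt.get((0, 2), 0),
--             cnt.get((2, 1), 0) + cnt.get((1, 2), 0),
--             cnt.get((2, 2), 0))
-- ===== Notes on version B (the rewrite author's own statement) =====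
-- stated objective: simpler
-- what changed: Replaces A's six in-loop branch tests (each re-indexing the dict) with a two-phase shape: one tally pass over the values into a frequency dict, then the six results read off the tally by summing symmetric genotype pairs.
import Mathlib
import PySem

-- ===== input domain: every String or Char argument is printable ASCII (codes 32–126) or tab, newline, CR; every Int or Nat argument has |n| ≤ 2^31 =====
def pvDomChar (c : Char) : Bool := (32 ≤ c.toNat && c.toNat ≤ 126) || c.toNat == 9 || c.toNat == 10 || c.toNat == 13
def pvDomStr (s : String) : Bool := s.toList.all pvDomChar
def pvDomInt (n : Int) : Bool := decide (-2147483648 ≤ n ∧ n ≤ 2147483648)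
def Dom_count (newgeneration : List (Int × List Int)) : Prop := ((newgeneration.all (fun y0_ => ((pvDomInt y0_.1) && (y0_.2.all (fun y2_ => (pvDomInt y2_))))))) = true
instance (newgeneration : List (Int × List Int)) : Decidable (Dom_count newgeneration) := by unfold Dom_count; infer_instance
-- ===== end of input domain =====

-- B replaces A's six in-loop branch tests with a tally-then-combine two-phase pass; equal return value, no side effects.

-- ===== PORT A =====
-- one iteration of A's loop body: the six `if` tests on the looked-up value v
def countStep (acc : Int × Int × Int × Int × Int × Int) (v : List Int) :
    Int × Int × Int × Int × Int × Int :=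
  match acc with
  | (cA, cB, cC, cD, cE, cF) =>
    let cA := if v == [0, 0] then cA + 1 else cA
    let cB := if v == [0, 1] || v == [1, 0] then cB + 1 else cB
    let cC := if v == [1, 1] then cC + 1 else cC
    let cD := if v == [2, 0] || v == [0, 2] then cD + 1 else cD
    let cE := if v == [2, 1] || v == [1, 2] then cE + 1 else cE
    let cF := if v == [2, 2] then cF + 1 else cF
    (cA, cB, cC, cD, cE, cF)

def count (newgeneration : List (Int × List Int)) : Int × Int × Int × Int × Int × Int :=
  let d := PySem.Dict.ofList newgeneration
  -- `for i in newgeneration:` iterates the dict's keys; `newgeneration[i]` looks i up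
  d.keys.foldl (fun acc i => countStep acc (d.getD i [])) (0, 0, 0, 0, 0, 0)

-- ===== PORT B =====
def count_alt (newgeneration : List (Int × List Int)) : Int × Int × Int × Int × Int × Int :=
  let d := PySem.Dict.ofList newgeneration
  let cnt := d.values.foldl (fun c v => c.insert v (c.getD v 0 + 1)) PySem.Dict.empty
  (cnt.getD [0, 0] 0,
   cnt.getD [0, 1] 0 + cnt.getD [1, 0] 0,
   cnt.getD [1, 1] 0,
   cnt.getD [2, 0] 0 + cnt.getD [0, 2] 0,
   cnt.getD [2, 1] 0 + cnt.getD [1, 2] 0,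
   cnt.getD [2, 2] 0)

-- ===== PRECONDITION & SPEC =====
def Spec_count (newgeneration : List (Int × List Int)) (out : Int × Int × Int × Int × Int × Int) : Prop := out = count_alt newgeneration
instance (newgeneration : List (Int × List Int)) (out : Int × Int × Int × Int × Int × Int) : Decidable (Spec_count newgeneration out) := by unfold Spec_count; infer_instance

-- ===== CLAIM (what is proved, stated in full; the proofs are below) =====
def Claim_equal_count : Prop := ∀ (newgeneration : List (Int × List Int)), Dom_count newgeneration → Spec_count newgeneration (count newgeneration)

-- ===== LEMMAS AND PROOFS =====

-- A's loop invariant: each counter grows by the count of its genotype(s) in the remaining values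
theorem countStep_foldl (l : List (List Int)) (a b c d e f : Int) :
    l.foldl countStep (a, b, c, d, e, f) =
      (a + l.count [0, 0],
       b + (l.count [0, 1] + l.count [1, 0]),
       c + l.count [1, 1],
       d + (l.count [2, 0] + l.count [0, 2]),
       e + (l.count [2, 1] + l.count [1, 2]),
       f + l.count [2, 2]) := by
  induction l generalizing a b c d e f with
  | nil => simp
  | cons v t ih =>
    simp only [List.foldl_cons, countStep, List.count_cons]
    rw [ih]
    simp only [Prod.mk.injEq, beq_iff_eq, Bool.or_eq_true]
    refine ⟨?_, ?_, ?_, ?_, ?_, ?_⟩ <;> split_ifs <;> simp_all <;> omega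

theorem count_spec' (newgeneration : List (Int × List Int)) :
    count newgeneration = count_alt newgeneration := by
  unfold count count_alt
  dsimp only
  simp only [PySem.Dict.getD_foldl_insert_add_one, PySem.Dict.getD_empty]
  conv_lhs =>
    rw [show (PySem.Dict.ofList newgeneration).keys.foldl
          (fun acc i => countStep acc ((PySem.Dict.ofList newgeneration).getD i []))
          (0, 0, 0, 0, 0, 0) =
        (PySem.Dict.ofList newgeneration).values.foldl countStep (0, 0, 0, 0, 0, 0) from by
      rw [PySem.Dict.values_eq_map_keys _ (PySem.Dict.nodup_keys_ofList newgeneration) ([] : List Int),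
          List.foldl_map]]
  rw [countStep_foldl]
  simp

-- ===== VERDICT (by name: the statement is the Claim_ definition above) =====
theorem count_spec : Claim_equal_count := by
  intro ng _
  unfold Spec_count
  exact count_spec' ng
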